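-- pv_equiv track=rewrite | github.com/nishio/atcoder | abc184/f.py | sum_for_all_subset_grey
-- ===== SOURCE A (Python) =====
-- def sum_for_all_subset_grey(XS):
--     N = len(XS)
--     ret = [0]
--     # init
--     s = 0
--     prev = 0
--     for i in range(1, 2 ** N):
--         g = i ^ (i >> 1)  # to greycode
--         x = mask = g ^ prev
--         # ctz
--         j = 0
--         while x & 1 == 0:
--             x >>= 1
--             j += 1
--
--         if g & mask:
--             s += XS[j]
--         else:
--             s -= XS[j]
--         # do sth on result
--         ret.append(s)
--         prev = g
--     return ret
-- ===== SOURCE B (Python) =====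
-- def sum_for_all_subset_grey(XS):
--     # DP over raw bitmasks (remove lowest set bit), then reindex through the Gray code.
--     N = len(XS)
--     f = [0]
--     for m in range(1, 1 << N):
--         low = m ^ (m & (m - 1))
--         f.append(f[m & (m - 1)] + XS[low.bit_length() - 1])
--     return [f[i ^ (i >> 1)] for i in range(1 << N)]
-- ===== Notes on version B (the rewrite author's own statement) =====
-- stated objective: alternative
-- what changed: A walks Gray codes incrementally, maintaining a running sum and the previous code and extracting the changed bit with a while-loop ctz; B instead builds a table of all subset sums indexed by raw bitmask via the lowest-set-bit DP f[m] = f[m & (m-1)] + XS[lowbit index] and then emits the answer in a separate Gray-code reindexing pass f[i ^ (i >> 1)].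
import Mathlib
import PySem

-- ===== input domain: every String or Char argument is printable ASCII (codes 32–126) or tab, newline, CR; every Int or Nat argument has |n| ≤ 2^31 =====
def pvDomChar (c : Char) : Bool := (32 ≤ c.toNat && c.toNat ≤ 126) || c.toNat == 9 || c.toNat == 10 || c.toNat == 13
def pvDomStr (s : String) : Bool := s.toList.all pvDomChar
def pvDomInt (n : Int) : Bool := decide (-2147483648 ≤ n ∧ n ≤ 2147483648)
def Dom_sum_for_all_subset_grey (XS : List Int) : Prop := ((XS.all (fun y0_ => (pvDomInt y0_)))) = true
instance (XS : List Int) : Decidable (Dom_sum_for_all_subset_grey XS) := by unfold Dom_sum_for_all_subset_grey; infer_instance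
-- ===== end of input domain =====

-- B replaces A's incremental Gray-code walk (running sum + previous code + while-loop ctz of the
-- changed bit) by a lowest-set-bit DP table of all subset sums plus a separate Gray-code reindex pass.

-- ===== PORT A =====
-- A's ctz while-loop `while x & 1 == 0: x >>= 1; j += 1`; the `x ≠ 0` conjunct only makes the
-- recursion total (Python loops forever on x = 0; unreachable here, the mask is never 0).
def pyCtz (x : Nat) : Nat :=
  if h : x &&& 1 = 0 ∧ x ≠ 0 then pyCtz (x >>> 1) + 1 else 0
decreasing_by
  simp only [Nat.shiftRight_one]
  exact Nat.div_lt_self (Nat.pos_of_ne_zero h.2) (by norm_num)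

-- one iteration of A's for-loop; state = (ret, s, prev).
-- `XS.getD j 0`: j ≥ 0 always; Python raises IndexError for j ≥ len(XS), which is unreachable
-- (j = ctz of the changed bit < len(XS)), so the default is a mere totalisation.
def greyStepA (XS : List Int) (st : List Int × Int × Nat) (i : Nat) : List Int × Int × Nat :=
  let ret := st.1
  let s := st.2.1
  let prev := st.2.2
  let g := i ^^^ (i >>> 1)
  let mask := g ^^^ prev
  let j := pyCtz mask
  let s' := if g &&& mask ≠ 0 then s + XS.getD j 0 else s - XS.getD j 0
  (ret ++ [s'], s', g)

-- range(1, 2 ** N) = List.range' 1 (2 ^ N - 1)  (exact: 2 ^ N ≥ 1)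
def sum_for_all_subset_grey (XS : List Int) : List Int :=
  let N := XS.length
  ((List.range' 1 (2 ^ N - 1)).foldl (greyStepA XS) ([0], 0, 0)).1

-- ===== PORT B =====
-- one iteration of B's table-building loop: f.append(f[m & (m-1)] + XS[low.bit_length() - 1]).
-- `low.log2` = low.bit_length() - 1 for low ≥ 1 (always: low is the lowest set bit of m ≥ 1);
-- `f[p]!` and `XS.getD … 0` default only where Python would raise, both unreachable.
def greyStepB (XS : List Int) (f : Array Int) (m : Nat) : Array Int :=
  let p := m &&& (m - 1)
  let low := m ^^^ p
  f.push (f[p]! + XS.getD low.log2 0)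

def sum_for_all_subset_grey_alt (XS : List Int) : List Int :=
  let N := XS.length
  let f := (List.range' 1 (2 ^ N - 1)).foldl (greyStepB XS) #[(0 : Int)]
  (List.range (2 ^ N)).map fun i => f[i ^^^ (i >>> 1)]!

-- ===== PRECONDITION & SPEC =====
def Spec_sum_for_all_subset_grey (XS : List Int) (out : List Int) : Prop := out = sum_for_all_subset_grey_alt XS
instance (XS : List Int) (out : List Int) : Decidable (Spec_sum_for_all_subset_grey XS out) := by unfold Spec_sum_for_all_subset_grey; infer_instance

-- ===== CLAIM (what is proved, stated in full; the proofs are below) =====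
def Claim_equal_sum_for_all_subset_grey : Prop := ∀ (XS : List Int), Dom_sum_for_all_subset_grey XS → Spec_sum_for_all_subset_grey XS (sum_for_all_subset_grey XS)

-- ===== LEMMAS AND PROOFS =====

-- the common mathematical reference: sum of XS over the set bits of m
def sb (XS : List Int) (m : Nat) : Int :=
  ∑ j ∈ Finset.range XS.length, if m.testBit j then XS.getD j 0 else 0

theorem sb_zero (XS : List Int) : sb XS 0 = 0 := by
  simp [sb]

-- pyCtz decomposition: every x ≠ 0 is 2^(pyCtz x) * (odd)
theorem pyCtz_eq (x : Nat) :
    pyCtz x = if x &&& 1 = 0 ∧ x ≠ 0 then pyCtz (x >>> 1) + 1 else 0 := by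
  rw [pyCtz]
  split <;> rfl

theorem pyCtz_decomp (x : Nat) (hx : x ≠ 0) : ∃ a, x = 2 ^ pyCtz x * (2 * a + 1) := by
  induction x using Nat.strong_induction_on with
  | _ x ih =>
    rw [pyCtz_eq]
    by_cases h : x &&& 1 = 0 ∧ x ≠ 0
    · simp only [if_pos h]
      have hmod : x % 2 = 0 := by
        have := h.1
        rwa [Nat.and_one_is_mod] at this
      have hlt : x >>> 1 < x := by
        simp only [Nat.shiftRight_one]
        exact Nat.div_lt_self (Nat.pos_of_ne_zero hx) (by norm_num)
      have hne : x >>> 1 ≠ 0 := by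
        simp only [Nat.shiftRight_one]
        omega
      obtain ⟨a, ha⟩ := ih (x >>> 1) hlt hne
      refine ⟨a, ?_⟩
      have hx2 : x = 2 * (x >>> 1) := by
        simp only [Nat.shiftRight_one]
        omega
      conv_lhs => rw [hx2, ha]
      ring
    · simp only [if_neg h]
      have hmod : x % 2 = 1 := by
        rcases Nat.mod_two_eq_zero_or_one x with h0 | h1
        · exfalso
          exact h ⟨by rwa [Nat.and_one_is_mod], hx⟩
        · exact h1
      exact ⟨x / 2, by simp; omega⟩

theorem pyCtz_two_pow (c : Nat) : pyCtz (2 ^ c) = c := by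
  induction c with
  | zero => rw [pyCtz_eq]; norm_num
  | succ c ih =>
    rw [pyCtz_eq]
    have hmod : 2 ^ (c + 1) &&& 1 = 0 := by
      rw [Nat.and_one_is_mod, pow_succ, Nat.mul_mod_left]
    have hsh : 2 ^ (c + 1) >>> 1 = 2 ^ c := by
      simp only [Nat.shiftRight_one, pow_succ]
      omega
    rw [if_pos ⟨hmod, by positivity⟩, hsh, ih]

theorem two_pow_pyCtz_le (x : Nat) (hx : x ≠ 0) : 2 ^ pyCtz x ≤ x := by
  obtain ⟨a, ha⟩ := pyCtz_decomp x hx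
  nlinarith [Nat.two_pow_pos (pyCtz x)]

-- x = 2^(c+1)·a + 2^c and x - 1 = 2^(c+1)·a + (2^c - 1), c = pyCtz x
theorem pyCtz_decomp' (x : Nat) (hx : x ≠ 0) :
    ∃ a, x = 2 ^ (pyCtz x + 1) * a + 2 ^ pyCtz x ∧
         x - 1 = 2 ^ (pyCtz x + 1) * a + (2 ^ pyCtz x - 1) := by
  obtain ⟨a, ha⟩ := pyCtz_decomp x hx
  have hpos := Nat.two_pow_pos (pyCtz x)
  have hmain : x = 2 ^ (pyCtz x + 1) * a + 2 ^ pyCtz x := by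
    rw [pow_succ]
    nlinarith [ha]
  exact ⟨a, hmain, by omega⟩

-- x ^^^ (x-1) = 2^(c+1) - 1 where c = pyCtz x
theorem xor_pred (x : Nat) (hx : x ≠ 0) : x ^^^ (x - 1) = 2 ^ (pyCtz x + 1) - 1 := by
  obtain ⟨a, h1, h2⟩ := pyCtz_decomp' x hx
  set c := pyCtz x with hc
  have hb1 : 2 ^ c < 2 ^ (c + 1) := Nat.pow_lt_pow_right (by norm_num) (by omega)
  have hb2 : 2 ^ c - 1 < 2 ^ (c + 1) := by omega
  apply Nat.eq_of_testBit_eq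
  intro i
  rw [Nat.testBit_xor, h2, h1, Nat.testBit_two_pow_mul_add a hb1 i,
    Nat.testBit_two_pow_mul_add a hb2 i]
  by_cases hi : i < c + 1
  · simp only [if_pos hi, Nat.testBit_two_pow, Nat.testBit_two_pow_sub_one]
    by_cases hci : c = i
    · simp [hci]
    · simp [hci]
      omega
  · simp [hi, Nat.testBit_two_pow_sub_one]

-- x &&& (x-1) clears the lowest set bit
theorem land_pred (x : Nat) (hx : x ≠ 0) : x &&& (x - 1) = x - 2 ^ pyCtz x := by
  obtain ⟨a, h1, h2⟩ := pyCtz_decomp' x hx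
  set c := pyCtz x with hc
  have hb1 : 2 ^ c < 2 ^ (c + 1) := Nat.pow_lt_pow_right (by norm_num) (by omega)
  have hb2 : 2 ^ c - 1 < 2 ^ (c + 1) := by omega
  have h3 : x - 2 ^ c = 2 ^ (c + 1) * a + 0 := by omega
  apply Nat.eq_of_testBit_eq
  intro i
  rw [Nat.testBit_and, h2, h3, h1, Nat.testBit_two_pow_mul_add a hb1 i,
    Nat.testBit_two_pow_mul_add a hb2 i,
    Nat.testBit_two_pow_mul_add a (Nat.two_pow_pos (c + 1)) i]
  by_cases hi : i < c + 1
  · simp only [if_pos hi, Nat.testBit_two_pow, Nat.testBit_two_pow_sub_one, Nat.zero_testBit]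
    by_cases hci : c = i <;> simp [hci]
  · simp [hi]

-- the cleared lowest bit: x = (x &&& (x-1)) ^^^ 2^c, the xor is the low bit, and bit c of the rest is 0
theorem land_pred_props (x : Nat) (hx : x ≠ 0) :
    (x &&& (x - 1)) ^^^ 2 ^ pyCtz x = x ∧ x ^^^ (x &&& (x - 1)) = 2 ^ pyCtz x ∧
    (x &&& (x - 1)).testBit (pyCtz x) = false := by
  obtain ⟨a, h1, h2⟩ := pyCtz_decomp' x hx
  set c := pyCtz x with hc
  have hb1 : 2 ^ c < 2 ^ (c + 1) := Nat.pow_lt_pow_right (by norm_num) (by omega)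
  have h3 : x - 2 ^ c = 2 ^ (c + 1) * a + 0 := by omega
  rw [land_pred x hx, h3]
  refine ⟨?_, ?_, ?_⟩
  · apply Nat.eq_of_testBit_eq
    intro i
    rw [Nat.testBit_xor, Nat.testBit_two_pow_mul_add a (Nat.two_pow_pos (c + 1)) i,
      Nat.testBit_two_pow]
    conv_rhs => rw [h1]
    rw [Nat.testBit_two_pow_mul_add a hb1 i, Nat.testBit_two_pow]
    by_cases hi : i < c + 1
    · simp [hi, Nat.zero_testBit]
    · have hci : ¬ c = i := fun h => hi (by rw [← h]; exact Nat.lt_succ_self c)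
      simp [hi, hci]
  · conv_lhs => rw [h1]
    apply Nat.eq_of_testBit_eq
    intro i
    rw [Nat.testBit_xor, Nat.testBit_two_pow_mul_add a (Nat.two_pow_pos (c + 1)) i,
      Nat.testBit_two_pow_mul_add a hb1 i, Nat.testBit_two_pow]
    by_cases hi : i < c + 1
    · simp [hi, Nat.zero_testBit]
    · have hci : ¬ c = i := fun h => hi (by rw [← h]; exact Nat.lt_succ_self c)
      simp [hi, hci]
  · rw [Nat.testBit_two_pow_mul_add a (Nat.two_pow_pos (c + 1)) c]
    simp [Nat.zero_testBit]

-- consecutive Gray codes differ in exactly bit pyCtz x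
theorem grey_xor (x : Nat) (hx : x ≠ 0) :
    (x ^^^ (x >>> 1)) ^^^ ((x - 1) ^^^ ((x - 1) >>> 1)) = 2 ^ pyCtz x := by
  have hre : (x ^^^ (x >>> 1)) ^^^ ((x - 1) ^^^ ((x - 1) >>> 1)) =
      (x ^^^ (x - 1)) ^^^ ((x ^^^ (x - 1)) >>> 1) := by
    rw [Nat.shiftRight_xor_distrib]
    apply Nat.eq_of_testBit_eq
    intro i
    simp only [Nat.testBit_xor]
    cases x.testBit i <;> cases (x >>> 1).testBit i <;>
      cases (x - 1).testBit i <;> cases ((x - 1) >>> 1).testBit i <;> rfl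
  rw [hre, xor_pred x hx]
  set c := pyCtz x with hc
  have hp : 2 ^ (c + 1) = 2 * 2 ^ c := by rw [pow_succ]; ring
  have hsh : (2 ^ (c + 1) - 1) >>> 1 = 2 ^ c - 1 := by
    simp only [Nat.shiftRight_one]
    omega
  rw [hsh]
  apply Nat.eq_of_testBit_eq
  intro i
  rw [Nat.testBit_xor, Nat.testBit_two_pow_sub_one, Nat.testBit_two_pow_sub_one,
    Nat.testBit_two_pow]
  by_cases hci : c = i
  · simp [hci]
  · simp [hci]
    omega

-- flipping one in-range bit changes sb by ±XS[c]
theorem sb_flip (XS : List Int) (m c : Nat) (hc : c < XS.length) :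
    sb XS (m ^^^ 2 ^ c) = sb XS m + (if m.testBit c then -(XS.getD c 0) else XS.getD c 0) := by
  unfold sb
  rw [← sub_eq_iff_eq_add']
  rw [← Finset.sum_sub_distrib]
  rw [Finset.sum_eq_single c]
  · rw [Nat.testBit_xor, Nat.testBit_two_pow]
    cases hm : m.testBit c <;> simp
  · intro j hj hjc
    rw [Nat.testBit_xor, Nat.testBit_two_pow]
    simp [Ne.symm hjc]
  · intro hcmem
    exact absurd (Finset.mem_range.mpr hc) hcmem

theorem grey_lt (x N : Nat) (h : x < 2 ^ N) : x ^^^ (x >>> 1) < 2 ^ N := by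
  refine Nat.xor_lt_two_pow h (lt_of_le_of_lt ?_ h)
  simp only [Nat.shiftRight_one]
  exact Nat.div_le_self x 2

theorem pyCtz_lt (x N : Nat) (hx : x ≠ 0) (h : x < 2 ^ N) : pyCtz x < N := by
  have := two_pow_pyCtz_le x hx
  have : 2 ^ pyCtz x < 2 ^ N := lt_of_le_of_lt this h
  exact (Nat.pow_lt_pow_iff_right (by norm_num)).mp this

-- A's loop invariant
theorem loopA (XS : List Int) (k : Nat) (hk : k ≤ 2 ^ XS.length - 1) :
    (List.range' 1 k).foldl (greyStepA XS) ([0], 0, 0) =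
      ((List.range (k + 1)).map (fun i => sb XS (i ^^^ (i >>> 1))),
       sb XS (k ^^^ (k >>> 1)), k ^^^ (k >>> 1)) := by
  induction k with
  | zero =>
    simp [sb_zero, List.range_one]
  | succ k ih =>
    have hpow : 0 < 2 ^ XS.length := Nat.two_pow_pos _
    have hk' : k ≤ 2 ^ XS.length - 1 := Nat.le_of_succ_le hk
    have hx : k + 1 ≠ 0 := Nat.succ_ne_zero k
    have hlt : k + 1 < 2 ^ XS.length := by omega
    set c := pyCtz (k + 1) with hcdef
    have hcN : c < XS.length := pyCtz_lt (k + 1) XS.length hx hlt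
    have hmask : ((k + 1) ^^^ ((k + 1) >>> 1)) ^^^ (k ^^^ (k >>> 1)) = 2 ^ c := by
      have h := grey_xor (k + 1) hx
      simpa using h
    have hgsucc : (k + 1) ^^^ ((k + 1) >>> 1) = (k ^^^ (k >>> 1)) ^^^ 2 ^ c := by
      rw [← hmask]
      apply Nat.eq_of_testBit_eq
      intro i
      simp only [Nat.testBit_xor]
      cases (k + 1).testBit i <;> cases ((k + 1) >>> 1).testBit i <;>
        cases k.testBit i <;> cases (k >>> 1).testBit i <;> rfl
    rw [List.range'_concat, List.foldl_append, ih hk', List.foldl_cons, List.foldl_nil]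
    have h1k : 1 + 1 * k = k + 1 := by omega
    rw [h1k]
    simp only [greyStepA]
    rw [hmask, pyCtz_two_pow, Nat.and_two_pow]
    rw [List.range_succ (n := k + 1), List.map_append, List.map_cons, List.map_nil, hgsucc]
    have hflip : ((k ^^^ k >>> 1) ^^^ 2 ^ c).testBit c = !((k ^^^ k >>> 1)).testBit c := by
      simp [Nat.testBit_xor]
    rw [hflip]
    cases hgb : (k ^^^ k >>> 1).testBit c
    · rw [sb_flip XS (k ^^^ (k >>> 1)) c hcN, hgb]
      simp
    · rw [sb_flip XS (k ^^^ (k >>> 1)) c hcN, hgb]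
      simp [sub_eq_add_neg]

-- array push vs `!`-indexing (no such lemmas in the library for getElem!)
theorem push_getElem!_lt (f : Array Int) (v : Int) (m : Nat) (h : m < f.size) :
    (f.push v)[m]! = f[m]! := by
  have h1 : (f.push v)[m]! = (f.push v)[m]'(by simp; omega) := getElem!_pos _ m (by simp; omega)
  have h2 : (f.push v)[m]'(by simp; omega) = f[m]'h := Array.getElem_push_lt h
  have h3 : f[m]! = f[m]'h := getElem!_pos f m h
  rw [h1, h2, h3]

theorem push_getElem!_eq (f : Array Int) (v : Int) (m : Nat) (h : m = f.size) :
    (f.push v)[m]! = v := by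
  subst h
  have h1 : (f.push v)[f.size]! = (f.push v)[f.size]'(by simp) := getElem!_pos _ _ (by simp)
  rw [h1, Array.getElem_push_eq]

-- B's loop invariant
theorem loopB (XS : List Int) (k : Nat) (hk : k ≤ 2 ^ XS.length - 1) :
    ((List.range' 1 k).foldl (greyStepB XS) #[(0 : Int)]).size = k + 1 ∧
    ∀ m, m ≤ k → ((List.range' 1 k).foldl (greyStepB XS) #[(0 : Int)])[m]! = sb XS m := by
  induction k with
  | zero =>
    refine ⟨rfl, ?_⟩
    intro m hm
    rw [Nat.le_zero] at hm
    subst hm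
    show (#[(0 : Int)])[0]! = sb XS 0
    rw [sb_zero]
    rfl
  | succ k ih =>
    have hpow : 0 < 2 ^ XS.length := Nat.two_pow_pos _
    have hk' : k ≤ 2 ^ XS.length - 1 := Nat.le_of_succ_le hk
    have hx : k + 1 ≠ 0 := Nat.succ_ne_zero k
    have hlt : k + 1 < 2 ^ XS.length := by omega
    obtain ⟨ihs, ihv⟩ := ih hk'
    set f := (List.range' 1 k).foldl (greyStepB XS) #[(0 : Int)] with hf
    set c := pyCtz (k + 1) with hcdef
    have hcN : c < XS.length := pyCtz_lt (k + 1) XS.length hx hlt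
    have h2c : 0 < 2 ^ c := Nat.two_pow_pos c
    have hle : 2 ^ c ≤ k + 1 := two_pow_pyCtz_le (k + 1) hx
    obtain ⟨hback, hxor, hbit⟩ := land_pred_props (k + 1) hx
    have hpk : (k + 1) &&& k = k + 1 - 2 ^ c := by
      have := land_pred (k + 1) hx
      simpa using this
    have hplek : k + 1 - 2 ^ c ≤ k := by omega
    rw [List.range'_concat, List.foldl_append, List.foldl_cons, List.foldl_nil]
    have h1k : 1 + 1 * k = k + 1 := by omega
    rw [h1k, ← hf]
    simp only [greyStepB, Nat.add_sub_cancel]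
    simp only [Nat.add_sub_cancel] at hback hxor hbit
    rw [hpk] at hxor hback hbit ⊢
    rw [hxor, Nat.log2_two_pow, ← hcdef]
    have hsz : (f.push (f[k + 1 - 2 ^ c]! + XS.getD c 0)).size = k + 2 := by
      rw [Array.size_push, ihs]
    refine ⟨hsz, ?_⟩
    intro m hm
    by_cases hmk : m ≤ k
    · rw [push_getElem!_lt _ _ m (by omega)]
      exact ihv m hmk
    · have hmk1 : m = k + 1 := by omega
      subst hmk1
      rw [push_getElem!_eq _ _ (k + 1) (by omega), ihv (k + 1 - 2 ^ c) hplek]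
      have hflip := sb_flip XS (k + 1 - 2 ^ c) c hcN
      rw [← hcdef] at hback hbit
      rw [hback, hbit] at hflip
      rw [hflip]
      simp

theorem a_eq (XS : List Int) :
    sum_for_all_subset_grey XS =
      (List.range (2 ^ XS.length)).map (fun i => sb XS (i ^^^ (i >>> 1))) := by
  have hpow : 0 < 2 ^ XS.length := Nat.two_pow_pos _
  have h : 2 ^ XS.length - 1 + 1 = 2 ^ XS.length := by omega
  show ((List.range' 1 (2 ^ XS.length - 1)).foldl (greyStepA XS) ([0], 0, 0)).1 = _
  rw [loopA XS (2 ^ XS.length - 1) le_rfl, h]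

theorem b_eq (XS : List Int) :
    sum_for_all_subset_grey_alt XS =
      (List.range (2 ^ XS.length)).map (fun i => sb XS (i ^^^ (i >>> 1))) := by
  have hpow : 0 < 2 ^ XS.length := Nat.two_pow_pos _
  obtain ⟨hsz, hval⟩ := loopB XS (2 ^ XS.length - 1) le_rfl
  show (List.range (2 ^ XS.length)).map
      (fun i => ((List.range' 1 (2 ^ XS.length - 1)).foldl (greyStepB XS) #[(0 : Int)])[i ^^^ (i >>> 1)]!) = _
  apply List.map_congr_left
  intro i hi
  rw [List.mem_range] at hi
  exact hval (i ^^^ (i >>> 1)) (by have := grey_lt i XS.length hi; omega)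

-- ===== VERDICT (by name: the statement is the Claim_ definition above) =====
theorem sum_for_all_subset_grey_spec : Claim_equal_sum_for_all_subset_grey := by
  intro XS _
  unfold Spec_sum_for_all_subset_grey
  rw [a_eq, b_eq]
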